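-- pv_equiv track=rewrite | github.com/Abhinaykanaparthi007/Data-Science- | Comprehensive Numerology Report/Numerology_Download_as_textfile.py | numerology_name_calculator
-- ===== SOURCE A (Python) =====
-- def numerology_name_calculator(name):
--     numerology_chart = {
--         'A': 1, 'B': 2, 'C': 3, 'D': 4, 'E': 5, 'F': 6, 'G': 7, 'H': 8, 'I': 9,
--         'J': 1, 'K': 2, 'L': 3, 'M': 4, 'N': 5, 'O': 6, 'P': 7, 'Q': 8, 'R': 9,
--         'S': 1, 'T': 2, 'U': 3, 'V': 4, 'W': 5, 'X': 6, 'Y': 7, 'Z': 8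
--     }
--     name = name.upper()
--     total = sum(numerology_chart[char] for char in name if char in numerology_chart)
--     return total
-- ===== SOURCE B (Python) =====
-- def numerology_name_calculator(name):
--     counts = {}
--     for ch in name.upper():
--         counts[ch] = counts.get(ch, 0) + 1
--     return sum(counts.get(chr(65 + i), 0) * (i % 9 + 1) for i in range(26))
-- ===== Notes on version B (the rewrite author's own statement) =====
-- stated objective: alternative
-- what changed: B builds a character-frequency dictionary in one pass and then computes the total as a weighted sum over the fixed 26-letter alphabet (count * ((i % 9) + 1)), instead of A's direct per-character table lookup and accumulation.
import Mathlib
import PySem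

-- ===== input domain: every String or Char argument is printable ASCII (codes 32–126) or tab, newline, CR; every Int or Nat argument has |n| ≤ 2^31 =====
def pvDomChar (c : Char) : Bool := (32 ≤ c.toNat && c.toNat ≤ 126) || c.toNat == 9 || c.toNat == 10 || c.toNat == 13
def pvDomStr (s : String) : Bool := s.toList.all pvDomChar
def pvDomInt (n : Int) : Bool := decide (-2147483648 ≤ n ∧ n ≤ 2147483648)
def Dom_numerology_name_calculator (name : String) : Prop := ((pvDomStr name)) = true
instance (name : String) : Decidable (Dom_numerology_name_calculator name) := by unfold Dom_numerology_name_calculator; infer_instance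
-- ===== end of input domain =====

-- B counts character frequencies in one pass and then takes a weighted sum over
-- the fixed 26-letter alphabet, instead of A's per-character table lookup; objective: alternative.

-- ===== PORT A =====
-- the dict literal of A, as a helper
def pyNumerologyChart : PySem.Dict Char Int := PySem.Dict.ofList
  [('A', 1), ('B', 2), ('C', 3), ('D', 4), ('E', 5), ('F', 6), ('G', 7), ('H', 8), ('I', 9),
   ('J', 1), ('K', 2), ('L', 3), ('M', 4), ('N', 5), ('O', 6), ('P', 7), ('Q', 8), ('R', 9),
   ('S', 1), ('T', 2), ('U', 3), ('V', 4), ('W', 5), ('X', 6), ('Y', 7), ('Z', 8)]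

def numerology_name_calculator (name : String) : Int :=
  let name := PySem.Str.upper name
  name.toList.foldl
    (fun total char =>
      if pyNumerologyChart.contains char then total + pyNumerologyChart.getD char 0
      else total) 0

-- ===== PORT B =====
def numerology_name_calculator_alt (name : String) : Int :=
  let counts : PySem.Dict Char Int :=
    (PySem.Str.upper name).toList.foldl
      (fun d ch => d.insert ch (d.getD ch 0 + 1)) PySem.Dict.empty
  (PySem.List.pyRange 0 26 1).foldl
    (fun t i => t + counts.getD (Char.ofNat (65 + i).toNat) 0 * (i % 9 + 1)) 0

-- ===== PRECONDITION & SPEC =====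
def Spec_numerology_name_calculator (name : String) (out : Int) : Prop := out = numerology_name_calculator_alt name
instance (name : String) (out : Int) : Decidable (Spec_numerology_name_calculator name out) := by unfold Spec_numerology_name_calculator; infer_instance

-- ===== CLAIM =====
def Claim_equal_numerology_name_calculator : Prop := ∀ (name : String), Dom_numerology_name_calculator name → Spec_numerology_name_calculator name (numerology_name_calculator name)

-- ===== LEMMAS AND PROOFS =====

-- per-character contribution of A's loop body
def contribA (c : Char) : Int :=
  if pyNumerologyChart.contains c then pyNumerologyChart.getD c 0 else 0

-- the alphabet key for index i, as in B
def keyOf (i : Int) : Char := Char.ofNat (65 + i).toNat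

-- one-character indicator sum over the 26-letter alphabet equals A's contribution
lemma point_fin : ∀ n : Fin 127,
    ((PySem.List.pyRange 0 26 1).map
      (fun i => (if keyOf i == Char.ofNat n.val then (1 : Int) else 0) * (i % 9 + 1))).sum
    = contribA (Char.ofNat n.val) := by
  set_option maxRecDepth 8000 in decide

lemma point (c : Char) (h : c.toNat ≤ 126) :
    ((PySem.List.pyRange 0 26 1).map
      (fun i => (if keyOf i == c then (1 : Int) else 0) * (i % 9 + 1))).sum
    = contribA c := by
  have hc : c = Char.ofNat c.toNat := (Char.ofNat_toNat c).symm
  have := point_fin ⟨c.toNat, by omega⟩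
  rw [hc]; exact this

-- splitting the weighted count sum on a cons
lemma split (c : Char) (l : List Char) (idx : List Int) :
    (idx.map (fun i => (((c :: l).count (keyOf i) : Int)) * (i % 9 + 1))).sum
    = (idx.map (fun i => ((l.count (keyOf i) : Int)) * (i % 9 + 1))).sum
      + (idx.map (fun i => (if keyOf i == c then (1 : Int) else 0) * (i % 9 + 1))).sum := by
  induction idx with
  | nil => simp
  | cons j rest ih =>
    simp only [List.map_cons, List.sum_cons]
    rw [ih]
    have hj : (((c :: l).count (keyOf j) : Int)) * (j % 9 + 1)
        = ((l.count (keyOf j) : Int)) * (j % 9 + 1)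
          + (if keyOf j == c then (1 : Int) else 0) * (j % 9 + 1) := by
      rw [List.count_cons]
      push_cast
      by_cases h : keyOf j = c
      · subst h; simp; ring
      · have h' : ¬ c = keyOf j := fun e => h e.symm
        simp [h, h']
    rw [hj]; ring

-- main invariant: A's mapped sum equals the weighted-count sum over the alphabet
lemma main_sum : ∀ l : List Char, (∀ c ∈ l, c.toNat ≤ 126) →
    (l.map contribA).sum
    = ((PySem.List.pyRange 0 26 1).map
        (fun i => ((l.count (keyOf i) : Int)) * (i % 9 + 1))).sum := by
  intro l
  induction l with
  | nil => intro _; simp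
  | cons c l ih =>
    intro h
    have hc : c.toNat ≤ 126 := h c (List.mem_cons_self)
    have hl : ∀ x ∈ l, x.toNat ≤ 126 := fun x hx => h x (List.mem_cons_of_mem _ hx)
    rw [List.map_cons, List.sum_cons, ih hl, split c l, point c hc]
    ring

lemma domCharLe (c : Char) (h : pvDomChar c = true) : c.toNat ≤ 126 := by
  simp [pvDomChar] at h; omega

lemma upperChar_le_fin : ∀ n : Fin 127, (PySem.Chars.upperChar (Char.ofNat n.val)).toNat ≤ 126 := by
  set_option maxRecDepth 4000 in decide

lemma upperChar_le (c : Char) (h : c.toNat ≤ 126) :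
    (PySem.Chars.upperChar c).toNat ≤ 126 := by
  have hc : c = Char.ofNat c.toNat := (Char.ofNat_toNat c).symm
  have := upperChar_le_fin ⟨c.toNat, by omega⟩
  rw [hc]; exact this

-- ===== VERDICT =====
theorem numerology_name_calculator_spec : Claim_equal_numerology_name_calculator := by
  intro name hdom
  unfold Spec_numerology_name_calculator numerology_name_calculator numerology_name_calculator_alt
  simp only []
  set u := (PySem.Str.upper name).toList with hu
  -- every character of u is ASCII (≤ 126)
  have hle : ∀ c ∈ u, c.toNat ≤ 126 := by
    intro c hc
    rw [hu, PySem.Str.toList_upper, PySem.Chars.upper] at hc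
    obtain ⟨x, hx, rfl⟩ := List.mem_map.mp hc
    exact upperChar_le x (domCharLe x ((List.all_eq_true.mp hdom) x hx))
  -- A's side: fold = sum of per-character contributions
  have hA : u.foldl
      (fun total char =>
        if pyNumerologyChart.contains char then total + pyNumerologyChart.getD char 0
        else total) 0 = (u.map contribA).sum := by
    have hbody : (fun (total : Int) (char : Char) =>
        if pyNumerologyChart.contains char then total + pyNumerologyChart.getD char 0
        else total) = fun total char => total + contribA char := by
      funext t c; unfold contribA; split <;> simp
    rw [hbody, PySem.List.foldl_add]
    simp
  -- B's side: the counter's lookups are counts of u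
  have hcnt : ∀ k : Char,
      (u.foldl (fun d ch => d.insert ch (d.getD ch 0 + 1)) PySem.Dict.empty).getD k 0
      = (u.count k : Int) := by
    intro k
    rw [PySem.Dict.getD_foldl_insert_add_one]
    simp
  have hB : (PySem.List.pyRange 0 26 1).foldl
      (fun t i => t +
        (u.foldl (fun d ch => d.insert ch (d.getD ch 0 + 1)) PySem.Dict.empty).getD
          (Char.ofNat (65 + i).toNat) 0 * (i % 9 + 1)) 0
      = ((PySem.List.pyRange 0 26 1).map
          (fun i => ((u.count (keyOf i) : Int)) * (i % 9 + 1))).sum := by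
    have hbody : (fun (t : Int) (i : Int) => t +
        (u.foldl (fun d ch => d.insert ch (d.getD ch 0 + 1)) PySem.Dict.empty).getD
          (Char.ofNat (65 + i).toNat) 0 * (i % 9 + 1))
        = fun t i => t + ((u.count (keyOf i) : Int)) * (i % 9 + 1) := by
      funext t i; rw [hcnt]; rfl
    rw [hbody, PySem.List.foldl_add]
    simp
  rw [hA, hB, main_sum u hle]
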